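-- pv_equiv track=rewrite | github.com/PermutaTriangle/comb_spec_searcher | atrap/recipes/row_column_separation.py | max_splits
-- ===== SOURCE A (Python) =====
-- def max_splits(valid_splits):
--     key = lambda split: len(set(split.values()))
--     m, max_list = key(valid_splits[0]), []
--     for s in valid_splits:
--         k = key(s)
--         if k > m:
--             m, max_list = k, [s]
--         elif k == m:
--             max_list.append(s)
--     return m, max_list
-- ===== SOURCE B (Python) =====
-- def max_splits(valid_splits):
--     key = lambda split: len(set(split.values()))
--     m = max(key(s) for s in valid_splits)
--     return m, [s for s in valid_splits if key(s) == m]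
-- ===== Notes on version B (the rewrite author's own statement) =====
-- stated objective: simpler
-- what changed: A's single running-max-with-accumulator loop (which rebuilds and discards candidate lists as the maximum grows) is replaced by a compute-max-then-filter decomposition: one pass computes the maximum key, a comprehension keeps exactly the splits attaining it.
import Mathlib
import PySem

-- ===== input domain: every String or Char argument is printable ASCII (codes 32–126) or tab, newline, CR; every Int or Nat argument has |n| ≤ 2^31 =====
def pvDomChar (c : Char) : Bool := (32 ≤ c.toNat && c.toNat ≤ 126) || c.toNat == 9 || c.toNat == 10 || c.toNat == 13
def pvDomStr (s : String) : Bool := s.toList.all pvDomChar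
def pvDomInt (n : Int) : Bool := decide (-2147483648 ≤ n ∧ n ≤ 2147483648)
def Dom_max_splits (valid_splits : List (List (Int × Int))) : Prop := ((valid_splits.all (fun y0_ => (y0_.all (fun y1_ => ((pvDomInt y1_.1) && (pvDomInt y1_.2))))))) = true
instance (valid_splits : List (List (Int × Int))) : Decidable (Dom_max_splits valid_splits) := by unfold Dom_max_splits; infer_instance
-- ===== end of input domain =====

-- B differs from A only in decomposition (max first, then filter); equivalence of the RETURN value is proved on nonempty input.

-- ===== PORT A =====
-- key = lambda split: len(set(split.values()))  (split is a dict, passed as an association list)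
def keyA (s : List (Int × Int)) : Int :=
  ((PySem.Set.ofList (PySem.Dict.values (PySem.Dict.ofList s))).length : Int)

-- m, max_list = key(valid_splits[0]), []; for s in valid_splits: … ; return m, max_list
def max_splits (valid_splits : List (List (Int × Int))) : Int × (List (List (Int × Int))) :=
  match valid_splits with
  | [] => (0, [])   -- unreachable under Pre_ (A raises IndexError on [])
  | h :: t =>
    (h :: t).foldl
      (fun (st : Int × List (List (Int × Int))) s =>
        let k := keyA s
        if k > st.1 then (k, [s])
        else if k = st.1 then (st.1, st.2 ++ [s])
        else st)
      (keyA h, [])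

-- ===== PORT B =====
def keyB (s : List (Int × Int)) : Int :=
  ((PySem.Set.ofList (PySem.Dict.values (PySem.Dict.ofList s))).length : Int)

-- m = max(key(s) for s in valid_splits); return m, [s for s in valid_splits if key(s) == m]
def max_splits_alt (valid_splits : List (List (Int × Int))) : Int × (List (List (Int × Int))) :=
  match valid_splits with
  | [] => (0, [])   -- unreachable under Pre_ (B's max raises ValueError on [])
  | h :: t =>
    let m := t.foldl (fun acc s => max acc (keyB s)) (keyB h)
    (m, (h :: t).filter (fun s => keyB s = m))

-- ===== PRECONDITION & SPEC =====
-- A raises IndexError on the empty list (valid_splits[0]); B's max raises ValueError there.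
def Pre_max_splits (valid_splits : List (List (Int × Int))) : Prop := valid_splits ≠ []
instance (valid_splits : List (List (Int × Int))) : Decidable (Pre_max_splits valid_splits) := by unfold Pre_max_splits; infer_instance
def pvWitness_max_splits : (List (List (Int × Int))) := [[(0, 1)], [(2, 3)]]

def Spec_max_splits (valid_splits : List (List (Int × Int))) (out : Int × (List (List (Int × Int)))) : Prop := out = max_splits_alt valid_splits
instance (valid_splits : List (List (Int × Int))) (out : Int × (List (List (Int × Int)))) : Decidable (Spec_max_splits valid_splits out) := by unfold Spec_max_splits; infer_instance

-- ===== CLAIM (what is proved, stated in full; the proofs are below) =====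
def Claim_equal_max_splits : Prop := ∀ (valid_splits : List (List (Int × Int))), Dom_max_splits valid_splits → Pre_max_splits valid_splits → Spec_max_splits valid_splits (max_splits valid_splits)

-- ===== LEMMAS AND PROOFS =====

-- A's loop, started at (m0, acc), returns the running max M and:
-- acc extended by the splits whose key equals M if no key exceeded m0, else just those splits.
theorem loopA_spec (xs : List (List (Int × Int))) (m0 : Int) (acc : List (List (Int × Int))) :
    xs.foldl
      (fun (st : Int × List (List (Int × Int))) s =>
        let k := keyA s
        if k > st.1 then (k, [s])
        else if k = st.1 then (st.1, st.2 ++ [s])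
        else st)
      (m0, acc)
    = (xs.foldl (fun a s => max a (keyA s)) m0,
       (if xs.foldl (fun a s => max a (keyA s)) m0 = m0 then acc else [])
         ++ xs.filter (fun s => keyA s = (xs.foldl (fun a s => max a (keyA s)) m0))) := by
  induction xs generalizing m0 acc with
  | nil => simp
  | cons h t ih =>
    have hge : ∀ (a : Int), a ≤ t.foldl (fun a s => max a (keyA s)) a :=
      fun a => (PySem.List.le_foldl_max_int t keyA a).1
    simp only [List.foldl_cons]
    by_cases h1 : keyA h > m0
    · rw [if_pos h1, ih]
      have hmax : max m0 (keyA h) = keyA h := by omega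
      have hM : keyA h ≤ t.foldl (fun a s => max a (keyA s)) (keyA h) := hge _
      simp only [hmax]
      have hne : t.foldl (fun a s => max a (keyA s)) (keyA h) ≠ m0 := by omega
      rw [if_neg hne]
      by_cases h2 : t.foldl (fun a s => max a (keyA s)) (keyA h) = keyA h
      · simp [h2]
      · have hne2 : ¬ (keyA h = t.foldl (fun a s => max a (keyA s)) (keyA h)) :=
          fun hc => h2 hc.symm
        simp [List.filter_cons, h2, hne2]
    · rw [if_neg h1]
      by_cases h2 : keyA h = m0
      · rw [if_pos h2, ih]
        have hmax : max m0 (keyA h) = m0 := by omega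
        simp only [hmax]
        by_cases h3 : t.foldl (fun a s => max a (keyA s)) m0 = m0
        · simp [h3, h2]
        · have hne : keyA h ≠ t.foldl (fun a s => max a (keyA s)) m0 := by omega
          rw [if_neg h3, if_neg h3]
          simp [hne]
      · rw [if_neg h2]
        -- keyA h < m0
        have hlt : keyA h < m0 := by omega
        rw [ih]
        have hmax : max m0 (keyA h) = m0 := by omega
        simp only [hmax]
        have hMge : m0 ≤ t.foldl (fun a s => max a (keyA s)) m0 := hge _
        have hne : keyA h ≠ t.foldl (fun a s => max a (keyA s)) m0 := by omega
        simp [hne]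

-- ===== VERDICT (by name: the statement is the Claim_ definition above) =====
theorem max_splits_spec : Claim_equal_max_splits := by
  intro vs _ hpre
  unfold Spec_max_splits
  match vs with
  | [] => exact absurd rfl hpre
  | h :: t =>
    show max_splits (h :: t) = max_splits_alt (h :: t)
    unfold max_splits max_splits_alt
    simp only [List.foldl_cons, gt_iff_lt, lt_self_iff_false, if_false,
      eq_self_iff_true, if_true, List.nil_append]
    rw [loopA_spec]
    have hkey : keyB = keyA := rfl
    rw [hkey]
    have hge : keyA h ≤ t.foldl (fun a s => max a (keyA s)) (keyA h) :=
      (PySem.List.le_foldl_max_int t keyA (keyA h)).1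
    by_cases h2 : t.foldl (fun a s => max a (keyA s)) (keyA h) = keyA h
    · simp [h2]
    · have hne : ¬ (keyA h = t.foldl (fun a s => max a (keyA s)) (keyA h)) :=
        fun hc => h2 hc.symm
      simp [List.filter_cons, h2, hne]
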